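-- pv_equiv track=rewrite | github.com/bmanandhar/python-practice | high_card_points.py | high_card_points
-- ===== SOURCE A (Python) =====
-- def high_card_points(hands):
--
--     points = 0
--     for i in range(len(hands)):
--
--         if hands[i] == "J":
--             points += 1
--
--         elif hands[i] == "Q":
--             points += 2
--
--         elif hands[i] == "K":
--             points += 3
--
--         elif hands[i] == "A":
--             points += 4
--
--     return points
-- ===== SOURCE B (Python) =====
-- def high_card_points(hands):
--     return (hands.count("J")
--             + 2 * hands.count("Q")
--             + 3 * hands.count("K")
--             + 4 * hands.count("A"))
-- ===== Notes on version B (the rewrite author's own statement) =====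
-- stated objective: idiomatic
-- what changed: Replaced the indexed loop with if/elif accumulation by a closed expression of four list.count calls weighted by point value.
import Mathlib
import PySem

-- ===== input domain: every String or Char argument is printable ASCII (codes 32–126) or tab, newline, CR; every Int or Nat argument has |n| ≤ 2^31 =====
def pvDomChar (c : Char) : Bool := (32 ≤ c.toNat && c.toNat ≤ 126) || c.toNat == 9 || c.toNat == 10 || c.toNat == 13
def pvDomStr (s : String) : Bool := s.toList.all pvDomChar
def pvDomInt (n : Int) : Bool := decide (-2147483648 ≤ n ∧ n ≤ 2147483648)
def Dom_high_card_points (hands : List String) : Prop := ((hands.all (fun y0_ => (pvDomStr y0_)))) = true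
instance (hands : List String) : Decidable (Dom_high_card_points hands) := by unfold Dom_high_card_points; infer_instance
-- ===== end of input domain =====

-- ===== PORT A =====
-- B replaces the indexed if/elif accumulation loop by a weighted sum of four list.count calls (idiomatic).
def high_card_points (hands : List String) : Int :=
  (PySem.List.pyRange 0 (PySem.List.len hands) 1).foldl
    (fun points i =>
      let h := PySem.List.pyGetD hands i ""
      if h = "J" then points + 1
      else if h = "Q" then points + 2
      else if h = "K" then points + 3
      else if h = "A" then points + 4
      else points) 0

-- ===== PORT B =====
def high_card_points_alt (hands : List String) : Int :=
  (PySem.List.count hands "J" : Int)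
    + 2 * (PySem.List.count hands "Q" : Int)
    + 3 * (PySem.List.count hands "K" : Int)
    + 4 * (PySem.List.count hands "A" : Int)

-- ===== PRECONDITION & SPEC =====
def Spec_high_card_points (hands : List String) (out : Int) : Prop := out = high_card_points_alt hands
instance (hands : List String) (out : Int) : Decidable (Spec_high_card_points hands out) := by unfold Spec_high_card_points; infer_instance

-- ===== CLAIM (what is proved, stated in full; the proofs are below) =====
def Claim_equal_high_card_points : Prop := ∀ (hands : List String), Dom_high_card_points hands → Spec_high_card_points hands (high_card_points hands)

-- ===== LEMMAS AND PROOFS =====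

-- ===== VERDICT (by name: the statement is the Claim_ definition above) =====
lemma hcp_foldl (hands : List String) (init : Int) :
    hands.foldl
      (fun points h =>
        if h = "J" then points + 1
        else if h = "Q" then points + 2
        else if h = "K" then points + 3
        else if h = "A" then points + 4
        else points) init
      = init + (hands.count "J" : Int) + 2 * (hands.count "Q" : Int)
          + 3 * (hands.count "K" : Int) + 4 * (hands.count "A" : Int) := by
  induction hands generalizing init with
  | nil => simp
  | cons h t ih =>
    simp only [List.foldl_cons, ih, List.count_cons]
    by_cases h1 : h = "J" <;> by_cases h2 : h = "Q" <;> by_cases h3 : h = "K" <;>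
      by_cases h4 : h = "A" <;> simp_all <;> push_cast <;> try ring

theorem high_card_points_spec : Claim_equal_high_card_points := by
  intro hands _
  unfold Spec_high_card_points high_card_points high_card_points_alt
  refine Eq.trans (PySem.List.foldl_pyRange_zero_pyGetD hands ""
    (fun (points : Int) (h : String) =>
      if h = "J" then points + 1
      else if h = "Q" then points + 2
      else if h = "K" then points + 3
      else if h = "A" then points + 4
      else points) 0) ?_
  rw [hcp_foldl]
  simp [PySem.List.count_eq]
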